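-- pv_equiv track=rewrite | github.com/Sworddanser/python_3.4_test_1 | HomeWork_lesson_3.4.py | get_count_dict
-- ===== SOURCE A (Python) =====
-- def get_count_dict(news_words):
--     q = []
--     for words in news_words:
--         l = len(words)
--         if l > 6:
--             q.append(words)
--     q2 = []
--     for i in q:
--         if i not in q2:
--             q2.append(i)
--     fin = {}
--     for i in q2:
--         fin[i] = q.count(i)
--     return fin
-- ===== SOURCE B (Python) =====
-- def get_count_dict(news_words):
--     fin = {}
--     for w in news_words:
--         if len(w) > 6:
--             fin[w] = fin.get(w, 0) + 1
--     return fin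
-- ===== Notes on version B (the rewrite author's own statement) =====
-- stated objective: faster
-- what changed: Replaces A's three passes (filter, quadratic manual dedup, then a .count rescan per distinct word) with a single pass that increments a counter dict keyed by the word.
import Mathlib
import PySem

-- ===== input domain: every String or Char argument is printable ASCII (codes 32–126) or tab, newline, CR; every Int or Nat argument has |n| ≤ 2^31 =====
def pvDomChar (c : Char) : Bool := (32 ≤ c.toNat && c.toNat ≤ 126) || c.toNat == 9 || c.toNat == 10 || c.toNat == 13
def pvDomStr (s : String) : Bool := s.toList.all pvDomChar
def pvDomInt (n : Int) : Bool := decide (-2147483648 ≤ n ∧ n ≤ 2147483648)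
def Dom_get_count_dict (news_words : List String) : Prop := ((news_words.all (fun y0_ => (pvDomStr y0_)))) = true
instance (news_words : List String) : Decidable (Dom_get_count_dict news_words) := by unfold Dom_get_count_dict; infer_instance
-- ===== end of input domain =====

-- B replaces A's filter + quadratic dedup + per-word .count rescan with one counting pass over the input (faster).


-- ===== PORT A =====
def get_count_dict (news_words : List String) : List (String × Int) :=
  let q := news_words.foldl (fun q words =>
    let l := PySem.Str.len words
    if l > 6 then q ++ [words] else q) []
  let q2 := q.foldl (fun q2 i => if q2.contains i then q2 else q2 ++ [i]) []
  let fin := q2.foldl (fun fin i => fin.insert i ((PySem.List.count q i : Int))) PySem.Dict.empty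
  fin.items

-- ===== PORT B =====
def get_count_dict_alt (news_words : List String) : List (String × Int) :=
  (news_words.foldl (fun fin w =>
    if PySem.Str.len w > 6 then fin.insert w (fin.getD w 0 + 1) else fin)
    PySem.Dict.empty).items

-- ===== PRECONDITION & SPEC =====
def Spec_get_count_dict (news_words : List String) (out : List (String × Int)) : Prop := out = get_count_dict_alt news_words
instance (news_words : List String) (out : List (String × Int)) : Decidable (Spec_get_count_dict news_words out) := by unfold Spec_get_count_dict; infer_instance

-- ===== CLAIM (what is proved, stated in full; the proofs are below) =====
def Claim_equal_get_count_dict : Prop := ∀ (news_words : List String), Dom_get_count_dict news_words → Spec_get_count_dict news_words (get_count_dict news_words)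

-- ===== LEMMAS AND PROOFS =====

-- ===== VERDICT (by name: the statement is the Claim_ definition above) =====
theorem get_count_dict_spec : Claim_equal_get_count_dict := by
  intro news_words _
  unfold Spec_get_count_dict get_count_dict get_count_dict_alt
  rw [PySem.List.foldl_ite_eq_foldl_filter, PySem.List.foldl_ite_eq_foldl_filter,
      PySem.Dict.foldl_insert_getD_add_one_eq_counter, PySem.List.foldl_append_singleton,
      PySem.Dict.items_counter]
  simp only [List.nil_append]
  rw [show (List.foldl (fun q2 i => if q2.contains i then q2 else q2 ++ [i]) []
        (List.filter (fun x => decide (PySem.Str.len x > 6)) news_words))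
      = PySem.Set.ofList (List.filter (fun x => decide (PySem.Str.len x > 6)) news_words) from rfl]
  rw [PySem.Dict.items_foldl_insert_fresh
        (PySem.Set.ofList (List.filter (fun x => decide (PySem.Str.len x > 6)) news_words))
        (fun a => a)
        (fun i => ((PySem.List.count (List.filter (fun x => decide (PySem.Str.len x > 6)) news_words) i : Int)))
        PySem.Dict.empty
        (fun a _ => rfl)
        (by simp [PySem.Set.nodup_ofList])]
  simp [PySem.List.count_eq, PySem.Dict.empty]
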